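-- pv_equiv track=rewrite | github.com/henriquegalva0/Tok-AI | create_subtitles.py | dictionary_treatment
-- ===== SOURCE A (Python) =====
-- def dictionary_treatment(subtitles_srt):
--     subtitles_list = subtitles_srt.split("\n")
--
--     dicionario = {}
--     for i in range(0, len(subtitles_list), 4):
--         if i + 2 < len(subtitles_list):
--             chave = subtitles_list[i + 1]
--             valor = subtitles_list[i + 2]
--             dicionario[chave] = valor
--     return dicionario
-- ===== SOURCE B (Python) =====
-- def dictionary_treatment(subtitles_srt):
--     # Single pass over the lines with a mod-4 position automaton:
--     # line at position 1 of each block becomes the pending key, the line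
--     # at position 2 is inserted under it; no indexing, no length guard
--     # (a key is only inserted when its value line is actually reached,
--     # which is exactly A's i+2 < len condition).
--     dicionario = {}
--     pos = 0
--     key = ""
--     for line in subtitles_srt.split("\n"):
--         if pos == 1:
--             key = line
--         elif pos == 2:
--             dicionario[key] = line
--         pos = (pos + 1) % 4
--     return dicionario
-- ===== Notes on version B (the rewrite author's own statement) =====
-- stated objective: alternative
-- what changed: Replaces A's index loop stepping by 4 with guarded subscripting (subtitles_list[i+1]/[i+2] under an i+2<len check) by a single linear pass over the lines driven by a mod-4 position automaton carrying a pending key; no indexing and no length guard are needed, since a pair is inserted exactly when its value line is reached.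
import Mathlib
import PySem

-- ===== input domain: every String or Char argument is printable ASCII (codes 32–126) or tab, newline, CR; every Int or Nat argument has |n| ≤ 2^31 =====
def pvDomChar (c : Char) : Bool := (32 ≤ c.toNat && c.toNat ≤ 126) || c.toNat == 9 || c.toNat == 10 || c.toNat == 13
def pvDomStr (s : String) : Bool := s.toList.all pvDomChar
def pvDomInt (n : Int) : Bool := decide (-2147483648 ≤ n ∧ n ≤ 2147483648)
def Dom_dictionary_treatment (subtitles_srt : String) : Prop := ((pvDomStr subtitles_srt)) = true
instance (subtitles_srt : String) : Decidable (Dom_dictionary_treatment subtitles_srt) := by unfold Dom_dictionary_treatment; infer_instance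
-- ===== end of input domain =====

-- B replaces A's step-4 index loop with guarded subscripting by a single linear pass
-- over the lines driven by a mod-4 position automaton carrying a pending key;
-- objective: alternative (same O(n) cost), return value only (neither version mutates anything).

-- ===== PORT A =====
def dictionary_treatment (subtitles_srt : String) : List (String × String) :=
  let subtitles_list := (PySem.Str.split? subtitles_srt "\n").getD []
  let dicionario : PySem.Dict String String :=
    (PySem.List.pyRange 0 (subtitles_list.length : Int) 4).foldl
      (fun d i =>
        if i + 2 < (subtitles_list.length : Int) then
          d.insert (PySem.List.pyGetD subtitles_list (i + 1) "")
                   (PySem.List.pyGetD subtitles_list (i + 2) "")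
        else d)
      PySem.Dict.empty
  dicionario.items

-- ===== PORT B =====
-- one step of Source B's loop body; pos stays in {0,1,2,3}, so Nat `% 4` is exact for Python's `%`
def pvStepB (st : PySem.Dict String String × Nat × String) (line : String) :
    PySem.Dict String String × Nat × String :=
  let (d, pos, key) := st
  if pos = 1 then (d, (pos + 1) % 4, line)
  else if pos = 2 then (d.insert key line, (pos + 1) % 4, key)
  else (d, (pos + 1) % 4, key)

def dictionary_treatment_alt (subtitles_srt : String) : List (String × String) :=
  let st := ((PySem.Str.split? subtitles_srt "\n").getD []).foldl pvStepB
      (PySem.Dict.empty, 0, "")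
  st.1.items

-- ===== PRECONDITION & SPEC =====
def Spec_dictionary_treatment (subtitles_srt : String) (out : List (String × String)) : Prop := out = dictionary_treatment_alt subtitles_srt
instance (subtitles_srt : String) (out : List (String × String)) : Decidable (Spec_dictionary_treatment subtitles_srt out) := by unfold Spec_dictionary_treatment; infer_instance

-- ===== CLAIM (what is proved, stated in full; the proofs are below) =====
def Claim_equal_dictionary_treatment : Prop := ∀ (subtitles_srt : String), Dom_dictionary_treatment subtitles_srt → Spec_dictionary_treatment subtitles_srt (dictionary_treatment subtitles_srt)

-- ===== LEMMAS AND PROOFS =====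

theorem filter_lt_range (m n : ℕ) (h : m ≤ n) :
    (List.range n).filter (fun k => decide (k < m)) = List.range m := by
  induction n with
  | zero =>
    have hm0 : m = 0 := by omega
    subst hm0; simp
  | succ n ih =>
    by_cases h' : m ≤ n
    · rw [List.range_succ, List.filter_append, ih h']
      simp; omega
    · have hm : m = n + 1 := by omega
      subst hm
      rw [List.filter_eq_self.2]
      intro a ha
      simp only [List.mem_range] at ha
      simpa using ha

-- A's stride-4 foldl, normalised to a foldl over block indices k < (len+1)/4
theorem aside_eq (lst : List String) :
    (PySem.List.pyRange 0 (lst.length : Int) 4).foldl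
      (fun d i =>
        if i + 2 < (lst.length : Int) then
          d.insert (PySem.List.pyGetD lst (i + 1) "") (PySem.List.pyGetD lst (i + 2) "")
        else d)
      (PySem.Dict.empty : PySem.Dict String String)
    = (List.range ((lst.length + 1) / 4)).foldl
        (fun d k => d.insert (lst.getD (4 * k + 1) "") (lst.getD (4 * k + 2) ""))
        PySem.Dict.empty := by
  rw [PySem.List.pyRange_of_pos 0 (lst.length : Int) (by norm_num : (0:Int) < 4)]
  rw [List.foldl_map]
  have hfun : (fun (d : PySem.Dict String String) (k : ℕ) =>
        if (0:Int) + 4 * (k:ℕ) + 2 < (lst.length : Int) then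
          d.insert (PySem.List.pyGetD lst ((0:Int) + 4 * (k:ℕ) + 1) "")
                   (PySem.List.pyGetD lst ((0:Int) + 4 * (k:ℕ) + 2) "")
        else d)
      = (fun (d : PySem.Dict String String) (k : ℕ) =>
        if (decide (k < (lst.length + 1) / 4)) = true then
          d.insert (lst.getD (4 * k + 1) "") (lst.getD (4 * k + 2) "")
        else d) := by
    funext d k
    have hiff : ((0:Int) + 4 * (k:ℕ) + 2 < (lst.length : Int)) ↔ (k < (lst.length + 1) / 4) := by omega
    have h1 : PySem.List.pyGetD lst ((0:Int) + 4 * (k:ℕ) + 1) "" = lst.getD (4 * k + 1) "" := by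
      rw [PySem.List.pyGetD_of_nonneg lst "" (by omega)]
      congr 1; omega
    have h2 : PySem.List.pyGetD lst ((0:Int) + 4 * (k:ℕ) + 2) "" = lst.getD (4 * k + 2) "" := by
      rw [PySem.List.pyGetD_of_nonneg lst "" (by omega)]
      congr 1; omega
    rw [h1, h2]
    by_cases hk : k < (lst.length + 1) / 4
    · rw [if_pos (hiff.2 hk), if_pos (by simpa using hk)]
    · rw [if_neg (fun hc => hk (hiff.1 hc)), if_neg (by simpa using hk)]
  rw [hfun]
  rw [PySem.List.foldl_if_eq_foldl_filter]
  by_cases h0 : 0 < lst.length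
  · rw [if_pos (by exact_mod_cast h0)]
    have hc : ((lst.length:Int) - 0 + 4 - 1) / 4 = ((lst.length + 3) / 4 : ℕ) := by omega
    rw [hc, Int.toNat_natCast]
    rw [filter_lt_range _ _ (by omega)]
  · have hl0 : lst.length = 0 := by omega
    rw [if_neg (by exact_mod_cast h0)]
    simp [hl0]

-- B's automaton fold, normalised to the same foldl over block indices
theorem bfold_eq (n : ℕ) : ∀ (lst : List String), lst.length ≤ n →
    ∀ (d : PySem.Dict String String) (key0 : String),
    (lst.foldl pvStepB (d, 0, key0)).1
      = (List.range ((lst.length + 1) / 4)).foldl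
          (fun d k => d.insert (lst.getD (4 * k + 1) "") (lst.getD (4 * k + 2) "")) d := by
  induction n with
  | zero =>
    intro lst h d key0
    have : lst = [] := List.length_eq_zero_iff.mp (by omega)
    subst this; simp
  | succ n ih =>
    intro lst h d key0
    match lst with
    | [] => simp
    | [a] => simp [pvStepB]
    | [a, b] => simp [pvStepB]
    | [a, b, c] => simp [pvStepB, List.range_succ]
    | a :: b :: c :: e :: rest =>
      have hstep : ((a :: b :: c :: e :: rest).foldl pvStepB (d, 0, key0))
          = rest.foldl pvStepB (d.insert b c, 0, b) := by
        simp [pvStepB]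
      rw [hstep, ih rest (by simp at h ⊢; omega) (d.insert b c) b]
      have hlen : ((a :: b :: c :: e :: rest).length + 1) / 4
          = (rest.length + 1) / 4 + 1 := by simp; omega
      rw [hlen, List.range_succ_eq_map, List.foldl_cons, List.foldl_map]
      have hg0 : (a :: b :: c :: e :: rest).getD (4 * 0 + 1) "" = b := rfl
      have hg0' : (a :: b :: c :: e :: rest).getD (4 * 0 + 2) "" = c := rfl
      rw [hg0, hg0']
      have hfe : (fun (d' : PySem.Dict String String) (k : ℕ) =>
            d'.insert ((a :: b :: c :: e :: rest).getD (4 * (k + 1) + 1) "")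
                      ((a :: b :: c :: e :: rest).getD (4 * (k + 1) + 2) ""))
          = (fun (d' : PySem.Dict String String) (k : ℕ) =>
            d'.insert (rest.getD (4 * k + 1) "") (rest.getD (4 * k + 2) "")) := by
        funext d' k
        have i1 : 4 * (k + 1) + 1 = (4 * k + 1) + 1 + 1 + 1 + 1 := by ring
        have i2 : 4 * (k + 1) + 2 = (4 * k + 2) + 1 + 1 + 1 + 1 := by ring
        simp only [i1, i2, List.getD_cons_succ]
      simp only [Nat.succ_eq_add_one]
      rw [hfe]

-- ===== VERDICT (by name: the statement is the Claim_ definition above) =====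
theorem dictionary_treatment_spec : Claim_equal_dictionary_treatment := by
  intro s _
  show dictionary_treatment s = dictionary_treatment_alt s
  unfold dictionary_treatment dictionary_treatment_alt
  set lst := (PySem.Str.split? s "\n").getD [] with hlst
  exact congrArg PySem.Dict.items
    ((aside_eq lst).trans (bfold_eq lst.length lst le_rfl PySem.Dict.empty "").symm)
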